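-- pv_equiv track=rewrite | github.com/CWhhhaaha/thesis_remote_4090 | experiments/tasks/transformer_geometry_survey/analyze_qk_geometry.py | filter_inventory
-- ===== SOURCE A (Python) =====
-- from typing import Dict, List, Optional
--
-- def filter_inventory(entries: List[Dict], category: str, models: Optional[List[str]], limit: int) -> List[Dict]:
--     out = entries
--     if category != "all":
--         out = [entry for entry in out if entry["category"] == category]
--     if models:
--         model_set = set(models)
--         out = [entry for entry in out if entry["model_id"] in model_set]
--     if limit > 0:
--         out = out[:limit]
--     return out
-- ===== SOURCE B (Python) =====
-- def filter_inventory(entries, category, models, limit):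
--     model_set = set(models) if models else None
--     result = []
--     for entry in entries:
--         if category != "all" and entry["category"] != category:
--             continue
--         if model_set is not None and entry["model_id"] not in model_set:
--             continue
--         result.append(entry)
--         if limit > 0 and len(result) == limit:
--             break
--     return result
-- ===== Notes on version B (the rewrite author's own statement) =====
-- stated objective: alternative
-- what changed: A builds up to three intermediate lists (category filter pass, model filter pass, slice); B is a single fused loop with one accumulator that skips non-matching entries and breaks as soon as the limit is reached.
import Mathlib
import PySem

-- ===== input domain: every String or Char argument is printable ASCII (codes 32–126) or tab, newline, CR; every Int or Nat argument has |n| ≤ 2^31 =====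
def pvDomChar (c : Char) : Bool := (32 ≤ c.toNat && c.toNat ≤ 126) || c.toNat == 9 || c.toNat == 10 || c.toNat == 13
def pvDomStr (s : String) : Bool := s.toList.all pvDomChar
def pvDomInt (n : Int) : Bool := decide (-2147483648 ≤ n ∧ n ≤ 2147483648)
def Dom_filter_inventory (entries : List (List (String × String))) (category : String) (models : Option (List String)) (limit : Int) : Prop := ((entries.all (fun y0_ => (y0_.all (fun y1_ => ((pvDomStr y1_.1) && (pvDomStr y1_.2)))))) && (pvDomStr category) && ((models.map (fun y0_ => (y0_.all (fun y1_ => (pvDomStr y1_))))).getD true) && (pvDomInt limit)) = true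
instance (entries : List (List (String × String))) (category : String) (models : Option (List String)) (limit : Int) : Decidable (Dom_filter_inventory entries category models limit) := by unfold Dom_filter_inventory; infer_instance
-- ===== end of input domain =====

-- B fuses A's three list-building passes (category filter, model filter, slice) into one loop
-- with a single accumulator and an early break at the limit; same return value, different shape.

-- ===== PORT A =====
-- dict lookup on the association-list representation (first match = the convention's lookup);
-- getD "" is only reached outside Pre_, where Python's entry[...] would raise KeyError.
def aKey (e : List (String × String)) (k : String) : Option String :=
  match e with
  | [] => none
  | (k', v) :: rest => if k' == k then some v else aKey rest k

def filter_inventory (entries : List (List (String × String))) (category : String) (models : Option (List String)) (limit : Int) : List (List (String × String)) :=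
  let out := entries
  let out := if category == "all" then out
             else out.filter (fun e => (aKey e "category").getD "" == category)
  let out := match models with
             | some (m :: ms) =>
               let modelSet := PySem.Set.ofList (m :: ms)
               out.filter (fun e => PySem.Set.contains modelSet ((aKey e "model_id").getD ""))
             | _ => out
  if limit > 0 then PySem.List.slice out none (some limit) else out

-- ===== PORT B =====
-- B's own copy of the association-list dict lookup (first match)
def bKey (e : List (String × String)) (k : String) : Option String :=
  match e with
  | [] => none
  | (k', v) :: rest => if k' == k then some v else bKey rest k

def altModelSet (models : Option (List String)) : Option (PySem.Set String) :=
  match models with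
  | none => none
  | some ms =>
    match ms with
    | [] => none
    | m :: rest => some (PySem.Set.ofList (m :: rest))

def altSkipModel (mset : Option (PySem.Set String)) (e : List (String × String)) : Bool :=
  match mset with
  | some s => !(PySem.Set.contains s ((bKey e "model_id").getD ""))
  | none => false

def altLoop (category : String) (mset : Option (PySem.Set String)) (limit : Int)
    (entries : List (List (String × String))) (acc : List (List (String × String))) :
    List (List (String × String)) :=
  match entries with
  | [] => acc.reverse
  | e :: rest =>
    if !(category == "all") && !((bKey e "category").getD "" == category) then
      altLoop category mset limit rest acc
    else if altSkipModel mset e then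
      altLoop category mset limit rest acc
    else
      let acc' := e :: acc
      if limit > 0 && ((acc'.length : Int) == limit) then acc'.reverse
      else altLoop category mset limit rest acc'

def filter_inventory_alt (entries : List (List (String × String))) (category : String) (models : Option (List String)) (limit : Int) : List (List (String × String)) :=
  altLoop category (altModelSet models) limit entries []

-- ===== PRECONDITION & SPEC =====
-- Pre_ excludes exactly the inputs where Python A raises KeyError: an entry without a
-- "category" key while a category filter is active, or a surviving entry without a
-- "model_id" key while a model filter is active.
-- Pre_'s own copy of the association-list dict lookup (first match)
def preKey (e : List (String × String)) (k : String) : Option String :=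
  match e with
  | [] => none
  | (k', v) :: rest => if k' == k then some v else preKey rest k

def Pre_filter_inventory (entries : List (List (String × String))) (category : String) (models : Option (List String)) (limit : Int) : Prop :=
  ∀ e ∈ entries,
    (category ≠ "all" → (preKey e "category").isSome = true) ∧
    ((models.getD []) ≠ [] → (category = "all" ∨ preKey e "category" = some category) →
      (preKey e "model_id").isSome = true)
instance (entries : List (List (String × String))) (category : String) (models : Option (List String)) (limit : Int) : Decidable (Pre_filter_inventory entries category models limit) := by unfold Pre_filter_inventory; infer_instance

def pvWitness_filter_inventory : (List (List (String × String))) × String × Option (List String) × Int :=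
  ([[("category", "x"), ("model_id", "m1")], [("category", "y"), ("model_id", "m2")]], "x", some ["m1", "m2"], 1)

def Spec_filter_inventory (entries : List (List (String × String))) (category : String) (models : Option (List String)) (limit : Int) (out : List (List (String × String))) : Prop := out = filter_inventory_alt entries category models limit
instance (entries : List (List (String × String))) (category : String) (models : Option (List String)) (limit : Int) (out : List (List (String × String))) : Decidable (Spec_filter_inventory entries category models limit out) := by unfold Spec_filter_inventory; infer_instance

-- ===== CLAIM (what is proved, stated in full; the proofs are below) =====
def Claim_equal_filter_inventory : Prop := ∀ (entries : List (List (String × String))) (category : String) (models : Option (List String)) (limit : Int), Dom_filter_inventory entries category models limit → Pre_filter_inventory entries category models limit → Spec_filter_inventory entries category models limit (filter_inventory entries category models limit)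

-- ===== LEMMAS AND PROOFS =====

-- the fused predicate both sides compute
def keepB (category : String) (mset : Option (PySem.Set String)) (e : List (String × String)) : Bool :=
  (category == "all" || (bKey e "category").getD "" == category) &&
  (match mset with
   | some s => PySem.Set.contains s ((bKey e "model_id").getD "")
   | none => true)

theorem aKey_eq_bKey (e : List (String × String)) (k : String) : aKey e k = bKey e k := by
  induction e with
  | nil => rfl
  | cons p rest ih => rw [aKey, bKey, ih]

theorem altLoop_eq (category : String) (mset : Option (PySem.Set String)) (limit : Int) :
    ∀ (entries acc : List (List (String × String))),
      (limit ≤ 0 ∨ (acc.length : Int) < limit) →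
      altLoop category mset limit entries acc =
        acc.reverse ++ (if limit > 0 then (entries.filter (keepB category mset)).take (limit.toNat - acc.length)
                        else entries.filter (keepB category mset)) := by
  intro entries
  induction entries with
  | nil => intro acc h; simp [altLoop]
  | cons e rest ih =>
    intro acc h
    by_cases hk : keepB category mset e = true
    · have hk1 : (category == "all" || (bKey e "category").getD "" == category) = true := by
        simp [keepB] at hk; simp [hk.1]
      have hk2 : (match mset with
                  | some s => PySem.Set.contains s ((bKey e "model_id").getD "")
                  | none => true) = true := by
        simp [keepB] at hk
        cases mset with
        | none => rfl
        | some s => simpa using hk.2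
      have hg1 : (!(category == "all") && !((bKey e "category").getD "" == category)) = false := by
        cases hc : (category == "all") <;> simp [hc] at hk1 ⊢ <;> simp [hk1]
      have hg2 : altSkipModel mset e = false := by
        cases mset with
        | none => rfl
        | some s => simp [altSkipModel]; simpa using hk2
      rw [altLoop, hg1, hg2]
      simp only [Bool.false_eq_true, if_false]
      by_cases hstop : (limit > 0 && (((e :: acc).length : Int) == limit)) = true
      · simp only [hstop, if_true]
        have hpos : limit > 0 := by simp at hstop; exact hstop.1
        have hlen : ((e :: acc).length : Int) = limit := by simp at hstop; exact hstop.2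
        have htn : limit.toNat - acc.length = 1 := by
          simp at hlen; omega
        simp [hpos, List.filter_cons, hk, htn]
      · simp only [hstop, if_false]
        have hrec : limit ≤ 0 ∨ (((e :: acc).length : Int) < limit) := by
          rcases h with h | h
          · exact Or.inl h
          · right
            simp only [Bool.and_eq_true, decide_eq_true_eq, beq_iff_eq] at hstop
            push_neg at hstop
            by_cases hpos : limit > 0
            · have := hstop hpos
              simp at this ⊢
              omega
            · omega
        rw [ih (e :: acc) hrec]
        by_cases hpos : limit > 0
        · have hlt : acc.length + 1 ≤ limit.toNat := by
            rcases h with h | h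
            · omega
            · omega
          simp [hpos, List.filter_cons, hk]
          rw [List.take_succ_cons.symm]
          congr 1
          omega
        · simp [hpos, List.filter_cons, hk]
    · -- e is skipped: one of the two guards fires
      have hk' : keepB category mset e = false := by simpa using hk
      have hgs : (!(category == "all") && !((bKey e "category").getD "" == category)) = true ∨
          ((!(category == "all") && !((bKey e "category").getD "" == category)) = false ∧
           altSkipModel mset e = true) := by
        simp only [keepB, Bool.and_eq_false_iff] at hk'
        rcases hk' with h1 | h2
        · left
          cases hc : (category == "all")
          · simp [hc] at h1 ⊢; simpa using h1
          · simp [hc] at h1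
        · by_cases hg1 : (!(category == "all") && !((bKey e "category").getD "" == category)) = true
          · exact Or.inl hg1
          · right
            refine ⟨by simpa using hg1, ?_⟩
            cases mset with
            | none => simp at h2
            | some s => simp [altSkipModel]; simpa using h2
      have hstep : altLoop category mset limit (e :: rest) acc = altLoop category mset limit rest acc := by
        rcases hgs with hg | ⟨hg1, hg2⟩
        · rw [altLoop, hg]; simp
        · rw [altLoop, hg1, hg2]
          simp
      rw [hstep, ih acc h]
      simp [List.filter_cons, hk']

theorem filterA_eq (entries : List (List (String × String))) (category : String) (models : Option (List String)) :
    (match models with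
     | some (m :: ms) =>
       (if category == "all" then entries
        else entries.filter (fun e => (bKey e "category").getD "" == category)).filter
         (fun e => PySem.Set.contains (PySem.Set.ofList (m :: ms)) ((bKey e "model_id").getD ""))
     | _ => (if category == "all" then entries
             else entries.filter (fun e => (bKey e "category").getD "" == category))) =
    entries.filter (keepB category (altModelSet models)) := by
  have hcat : (if category == "all" then entries
               else entries.filter (fun e => (bKey e "category").getD "" == category)) =
      entries.filter (fun e => category == "all" || (bKey e "category").getD "" == category) := by
    by_cases hc : (category == "all") = true
    · simp [hc]
    · simp only [hc, if_neg, Bool.false_eq_true, if_false]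
      apply List.filter_congr
      intro e _
      simp only [Bool.eq_false_iff, ne_eq] at hc
      simp [Bool.eq_false_iff.mpr hc]
  match models with
  | none => rw [hcat]; apply List.filter_congr; intro e _; simp [keepB, altModelSet]
  | some [] => rw [hcat]; apply List.filter_congr; intro e _; simp [keepB, altModelSet]
  | some (m :: ms) =>
    simp only
    rw [hcat, List.filter_filter]
    apply List.filter_congr
    intro e _
    simp [keepB, altModelSet, Bool.and_comm]

-- ===== VERDICT (by name: the statement is the Claim_ definition above) =====
theorem filter_inventory_spec : Claim_equal_filter_inventory := by
  intro entries category models limit _hdom _hpre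
  unfold Spec_filter_inventory filter_inventory filter_inventory_alt
  simp only [funext (fun e => aKey_eq_bKey e "category"), funext (fun e => aKey_eq_bKey e "model_id"), aKey_eq_bKey]
  rw [altLoop_eq category (altModelSet models) limit entries []
      (by by_cases h : limit > 0 <;> [exact Or.inr (by simpa using h); exact Or.inl (by omega)])]
  simp only [List.reverse_nil, List.nil_append, List.length_nil, Nat.sub_zero]
  have h := filterA_eq entries category models
  by_cases hpos : limit > 0
  · have hslice : ∀ (xs : List (List (String × String))),
        PySem.List.slice xs none (some limit) = xs.take limit.toNat :=
      fun xs => PySem.List.slice_to xs (by omega)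
    simp only [hpos, if_true, hslice]
    cases models with
    | none => simpa using congrArg (List.take limit.toNat) h
    | some l => cases l with
      | nil => simpa using congrArg (List.take limit.toNat) h
      | cons m ms => simpa using congrArg (List.take limit.toNat) h
  · simp only [hpos, if_false]
    cases models with
    | none => simpa using h
    | some l => cases l with
      | nil => simpa using h
      | cons m ms => simpa using h
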